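-- pv_equiv track=rewrite | github.com/marvang/vuln-variants | github_commit_utils.py | _resolve_canonical_sha
-- ===== SOURCE A (Python) =====
-- def _resolve_canonical_sha(repo_shas, sha):
--     """Choose a unique longest known SHA that extends the given prefix."""
--     candidates = [candidate for candidate in repo_shas if candidate.startswith(sha)]
--     if not candidates:
--         return sha
--
--     max_len = max(len(candidate) for candidate in candidates)
--     longest = sorted(candidate for candidate in candidates if len(candidate) == max_len)
--     if len(longest) == 1:
--         return longest[0]
--     return sha
-- ===== SOURCE B (Python) =====
-- def _resolve_canonical_sha(repo_shas, sha):
--     """Choose a unique longest known SHA that extends the given prefix.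
--
--     Single pass: track the first longest matching candidate and how many
--     candidates are tied at that length; unique longest wins, else the prefix.
--     """
--     best = sha
--     best_len = -1
--     count = 0
--     for candidate in repo_shas:
--         if candidate.startswith(sha):
--             n = len(candidate)
--             if n > best_len:
--                 best, best_len, count = candidate, n, 1
--             elif n == best_len:
--                 count += 1
--     if count == 1:
--         return best
--     return sha
-- ===== Notes on version B (the rewrite author's own statement) =====
-- stated objective: simpler
-- what changed: Replaced the four passes (filter, max of lengths, filter-to-longest, sort) by one loop over repo_shas keeping the first longest matching candidate and a count of length ties; no intermediate lists and no sort.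
import Mathlib
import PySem

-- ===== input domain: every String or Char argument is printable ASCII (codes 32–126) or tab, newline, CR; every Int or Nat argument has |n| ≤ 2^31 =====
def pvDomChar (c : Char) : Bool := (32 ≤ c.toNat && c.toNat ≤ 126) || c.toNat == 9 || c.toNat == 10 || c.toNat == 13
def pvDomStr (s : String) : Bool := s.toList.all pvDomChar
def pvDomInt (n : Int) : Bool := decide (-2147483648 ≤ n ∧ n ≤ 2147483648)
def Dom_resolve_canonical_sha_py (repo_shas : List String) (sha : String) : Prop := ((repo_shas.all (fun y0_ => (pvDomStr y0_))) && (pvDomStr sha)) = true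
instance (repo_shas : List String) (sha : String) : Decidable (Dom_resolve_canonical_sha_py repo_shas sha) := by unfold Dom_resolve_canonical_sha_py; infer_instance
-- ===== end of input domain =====

-- B replaces A's four passes (filter, max, filter, sort) by one loop keeping the first
-- longest matching candidate and a tie count; objective: simpler.


-- ===== PORT A =====
def resolve_canonical_sha_py (repo_shas : List String) (sha : String) : String :=
  let candidates := repo_shas.filter (fun candidate => PySem.Str.startswith candidate sha)
  if candidates = [] then sha
  else
    let max_len : Int := (PySem.List.max? (candidates.map (fun candidate => PySem.Str.len candidate)) (fun x => x)).getD 0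
    let longest := PySem.List.sorted (candidates.filter (fun candidate => PySem.Str.len candidate = max_len)) (fun x => x) false
    if longest.length = 1 then longest.headD sha else sha

-- ===== PORT B =====
def resolve_canonical_sha_py_alt (repo_shas : List String) (sha : String) : String :=
  let st := repo_shas.foldl
    (fun (st : String × Int × Int) candidate =>
      if PySem.Str.startswith candidate sha then
        let n : Int := PySem.Str.len candidate
        if n > st.2.1 then (candidate, n, 1)
        else if n = st.2.1 then (st.1, st.2.1, st.2.2 + 1)
        else st
      else st)
    (sha, -1, 0)
  if st.2.2 = 1 then st.1 else sha

-- ===== PRECONDITION & SPEC =====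
def Spec_resolve_canonical_sha_py (repo_shas : List String) (sha : String) (out : String) : Prop := out = resolve_canonical_sha_py_alt repo_shas sha
instance (repo_shas : List String) (sha : String) (out : String) : Decidable (Spec_resolve_canonical_sha_py repo_shas sha out) := by unfold Spec_resolve_canonical_sha_py; infer_instance

-- ===== CLAIM (what is proved, stated in full; the proofs are below) =====
def Claim_equal_resolve_canonical_sha_py : Prop := ∀ (repo_shas : List String) (sha : String), Dom_resolve_canonical_sha_py repo_shas sha → Spec_resolve_canonical_sha_py repo_shas sha (resolve_canonical_sha_py repo_shas sha)

-- ===== LEMMAS AND PROOFS =====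

-- B's loop body on a matching candidate
def pvStep (st : String × Int × Int) (c : String) : String × Int × Int :=
  if PySem.Str.len c > st.2.1 then (c, PySem.Str.len c, 1)
  else if PySem.Str.len c = st.2.1 then (st.1, st.2.1, st.2.2 + 1)
  else st

-- running max of lengths (A's max_len, B's best_len), in cast form
def pvM (cs : List String) : Int := (cs.map (fun c => (c.length : Int))).foldl max (-1)

lemma pvM_append (cs : List String) (c : String) :
    pvM (cs ++ [c]) = max (pvM cs) ((c.length : Int)) := by
  simp [pvM, List.foldl_append]

lemma pvM_le (cs : List String) {d : String} (hd : d ∈ cs) :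
    (d.length : Int) ≤ pvM cs := by
  have := (PySem.List.le_foldl_max (cs.map (fun c => (c.length : Int))) (-1)).2
  exact this _ (List.mem_map_of_mem hd)

-- loop invariant for B's fold restricted to the matching candidates
lemma pvLoop_inv (sha : String) (cs : List String) (hne : cs ≠ []) :
    ∃ b, cs.foldl pvStep (sha, -1, 0) =
        (b, pvM cs, ((cs.filter fun c => (c.length : Int) = pvM cs).length : Int))
      ∧ b ∈ cs ∧ (b.length : Int) = pvM cs := by
  induction cs using List.reverseRecOn with
  | nil => exact absurd rfl hne
  | append_singleton ds c ih =>
    rcases eq_or_ne ds [] with hds | hds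
    · subst hds
      have h1 : (-1 : Int) < (c.length : Int) := by omega
      refine ⟨c, ?_, by simp, ?_⟩
      · simp [pvStep, pvM, PySem.Str.len_eq, h1]
      · simp [pvM]
    · obtain ⟨b, heq, hb, hlb⟩ := ih hds
      rw [List.foldl_append, heq]
      rcases lt_trichotomy (pvM ds) ((c.length : Int)) with hlt | heqc | hgt
      · -- new strict maximum: everything before is shorter
        have hM : pvM (ds ++ [c]) = (c.length : Int) := by
          rw [pvM_append]; exact max_eq_right hlt.le
        refine ⟨c, ?_, by simp, by rw [hM]⟩
        have hfilter : (ds.filter fun d => d.length = c.length) = [] := by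
          rw [List.filter_eq_nil_iff]
          intro d hd
          have := pvM_le ds hd
          simp only [decide_eq_true_eq]
          omega
        simp [pvStep, hlt, hM, List.filter_append, hfilter]
      · -- tie at the maximum: count increments, best unchanged
        have hM : pvM (ds ++ [c]) = pvM ds := by
          rw [pvM_append, ← heqc]; simp
        refine ⟨b, ?_, List.mem_append_left _ hb, by rw [hM]; exact hlb⟩
        have hfilter : ((ds ++ [c]).filter fun d => (d.length : Int) = pvM (ds ++ [c])) =
            (ds.filter fun d => (d.length : Int) = pvM ds) ++ [c] := by
          rw [List.filter_append, hM]; simp [← heqc]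
        rw [hfilter, hM]
        simp [pvStep, PySem.Str.len_eq, heqc.symm]
      · -- shorter than the maximum: nothing changes
        have hM : pvM (ds ++ [c]) = pvM ds := by
          rw [pvM_append]; exact max_eq_left hgt.le
        refine ⟨b, ?_, List.mem_append_left _ hb, by rw [hM]; exact hlb⟩
        have hfilter : ((ds ++ [c]).filter fun d => (d.length : Int) = pvM (ds ++ [c])) =
            (ds.filter fun d => (d.length : Int) = pvM ds) := by
          rw [List.filter_append, hM]
          simp [show ¬ ((c.length : Int) = pvM ds) by omega]
        rw [hfilter, hM]
        have h1 : ¬ ((c.length : Int) > pvM ds) := by omega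
        have h2 : ¬ ((c.length : Int) = pvM ds) := by omega
        simp [pvStep, PySem.Str.len_eq, h1, h2]

-- A's max_len equals the running max pvM on a nonempty candidate list
lemma pvMaxlen_eq (cs : List String) (hne : cs ≠ []) :
    (PySem.List.max? (cs.map (fun c => PySem.Str.len c)) (fun x => x)).getD 0 = pvM cs := by
  obtain ⟨x, t, rfl⟩ := List.exists_cons_of_ne_nil hne
  rw [show ((x :: t).map fun c => PySem.Str.len c)
      = ((x.length : Int)) :: t.map (fun c => (c.length : Int)) by simp,
    PySem.List.max?_id_cons]
  simp only [Option.getD_some, pvM, List.map_cons, List.foldl_cons]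
  rw [max_eq_right (by omega : (-1 : Int) ≤ (x.length : Int))]

-- ===== VERDICT (by name: the statement is the Claim_ definition above) =====
theorem resolve_canonical_sha_py_spec : Claim_equal_resolve_canonical_sha_py := by
  intro repo_shas sha _
  unfold Spec_resolve_canonical_sha_py resolve_canonical_sha_py resolve_canonical_sha_py_alt
  have hfold : repo_shas.foldl
      (fun (st : String × Int × Int) candidate =>
        if PySem.Str.startswith candidate sha then
          let n : Int := PySem.Str.len candidate
          if n > st.2.1 then (candidate, n, 1)
          else if n = st.2.1 then (st.1, st.2.1, st.2.2 + 1)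
          else st
        else st) (sha, -1, 0)
      = (repo_shas.filter (fun candidate => PySem.Str.startswith candidate sha)).foldl
          pvStep (sha, -1, 0) := by
    rw [List.foldl_filter]
    rfl
  set cs := repo_shas.filter (fun candidate => PySem.Str.startswith candidate sha) with hcs
  rcases eq_or_ne cs [] with hne | hne
  · simp only [hfold, hne, List.foldl_nil]
    norm_num
  · obtain ⟨b, heq, hb, hlb⟩ := pvLoop_inv sha cs hne
    rw [if_neg hne, pvMaxlen_eq cs hne, hfold, heq]
    simp only [PySem.Str.len_eq]
    set F := cs.filter fun c => (c.length : Int) = pvM cs with hF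
    have hbF : b ∈ F := by
      rw [hF, List.mem_filter]
      exact ⟨hb, by simpa using hlb⟩
    have hlen : (PySem.List.sorted F (fun x => x) false).length = F.length :=
      PySem.List.length_sorted F _ _
    by_cases hone : F.length = 1
    · -- unique longest: F = [b], sorted [b] = [b]
      obtain ⟨y, hy⟩ := List.length_eq_one_iff.mp hone
      have hby : b = y := by rw [hy] at hbF; simpa using hbF
      have hFb : F = [b] := by rw [hy, hby]
      have hsorted : PySem.List.sorted F (fun x => x) false = [b] := by
        rw [hFb]
        exact PySem.List.sorted_eq_self_of_pairwise [b] _ (by simp)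
      simp [← hF, hone, hsorted]
    · have hcount : ¬ ((F.length : Int) = 1) := by omega
      simp [← hF, hone, hcount]
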